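-- pv_equiv track=rewrite | github.com/SilverHaze99/ChromaSleuth | chromasleuth.py | reduce_colors
-- ===== SOURCE A (Python) =====
-- from collections import Counter
-- from typing import List, Tuple, Dict, Optional, Union
--
-- def reduce_colors(colors: Dict, reduction_factor: int = 32) -> Dict:
--     """
--     Reduce color palette by grouping similar colors
--
--     Args:
--         colors: Dictionary with colors and frequencies
--         reduction_factor: Factor for color reduction (32 = 8 levels per channel)
--
--     Returns:
--         Dictionary with reduced colors
--     """
--     reduced_colors = Counter()
--
--     for color, count in colors.items():
--         # Reduce each RGB value
--         reduced_color = tuple(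
--             (c // reduction_factor) * reduction_factor
--             for c in color
--         )
--         reduced_colors[reduced_color] += count
--
--     return dict(reduced_colors)
-- ===== SOURCE B (Python) =====
-- def reduce_colors(colors, reduction_factor=32):
--     """Selection-grouping rewrite: quantize every (color, count) item into a
--     (quantized_key, count) pair, then repeatedly take the first remaining pair,
--     sum the counts of all pairs sharing its key, and drop them — no Counter."""
--     pairs = [
--         (tuple((c // reduction_factor) * reduction_factor for c in color), count)
--         for color, count in colors.items()
--     ]
--     reduced = {}
--     while pairs:
--         key, count = pairs[0]
--         rest = pairs[1:]
--         reduced[key] = count + sum(n for k, n in rest if k == key)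
--         pairs = [(k, n) for k, n in rest if k != key]
--     return reduced
-- ===== Notes on version B (the rewrite author's own statement) =====
-- stated objective: alternative
-- what changed: Replaced the Counter hash-accumulation loop with selection grouping: build the list of (quantized-key, count) pairs once, then repeatedly take the first remaining pair, add up the counts of all pairs with the same key, and filter them out.
-- outside the precondition, e.g. on reduce_colors({(0, 0, 0): 1}, 0): A raises ZeroDivisionError, B raises ZeroDivisionError
import Mathlib
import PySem

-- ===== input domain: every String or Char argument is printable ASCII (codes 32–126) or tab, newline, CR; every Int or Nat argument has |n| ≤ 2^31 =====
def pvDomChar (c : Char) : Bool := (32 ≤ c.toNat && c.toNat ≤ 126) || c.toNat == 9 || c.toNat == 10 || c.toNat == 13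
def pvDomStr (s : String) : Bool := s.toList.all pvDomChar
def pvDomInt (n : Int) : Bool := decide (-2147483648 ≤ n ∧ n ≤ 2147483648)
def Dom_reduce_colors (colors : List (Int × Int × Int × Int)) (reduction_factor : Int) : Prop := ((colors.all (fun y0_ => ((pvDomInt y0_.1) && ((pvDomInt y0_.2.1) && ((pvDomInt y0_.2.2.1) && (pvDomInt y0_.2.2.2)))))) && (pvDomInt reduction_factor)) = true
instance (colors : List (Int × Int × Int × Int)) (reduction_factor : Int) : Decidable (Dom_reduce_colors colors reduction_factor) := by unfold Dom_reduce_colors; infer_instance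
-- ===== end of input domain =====

-- B replaces A's Counter hash-accumulation with selection grouping over the quantized (key, count) pairs
-- (take first remaining pair, sum counts of equal keys, filter them out); alternative decomposition, not faster.


-- quantization of one channel / of a color's three channels ('(c // reduction_factor) * reduction_factor'),
-- the identical expression both Pythons contain
def pvQuant (rf c : Int) : Int := PySem.Int.floordiv c rf * rf

def pvKey (rf : Int) (e : Int × Int × Int × Int) : Int × Int × Int :=
  (pvQuant rf e.1, pvQuant rf e.2.1, pvQuant rf e.2.2.1)

-- ===== PORT A =====
-- reduced_colors = Counter(); for color, count in colors.items(): reduced_colors[quantized] += count; dict(…)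
def reduce_colors (colors : List (Int × Int × Int × Int)) (reduction_factor : Int) : List (Int × Int × Int × Int) :=
  let reduced :=
    colors.foldl
      (fun d e => d.modify (pvKey reduction_factor e) 0 (· + e.2.2.2))
      PySem.Dict.empty
  reduced.items.map (fun p => (p.1.1, p.1.2.1, p.1.2.2, p.2))

-- ===== PORT B =====
-- the 'while pairs:' loop of Source B: emit the first pair's key with the summed counts
-- of all pairs sharing it, recurse on the pairs with a different key
def pvGroup : List ((Int × Int × Int) × Int) → List ((Int × Int × Int) × Int)
  | [] => []
  | p :: rest =>
      (p.1, p.2 + ((rest.filter (fun q => q.1 == p.1)).map (·.2)).sum)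
        :: pvGroup (rest.filter (fun q => q.1 != p.1))
termination_by l => l.length
decreasing_by
  simp only [List.length_cons, List.length_unattach]
  exact Nat.lt_succ_of_le (le_trans (List.length_filter_le _ _) (by simp))

def reduce_colors_alt (colors : List (Int × Int × Int × Int)) (reduction_factor : Int) : List (Int × Int × Int × Int) :=
  let pairs := colors.map (fun e => (pvKey reduction_factor e, e.2.2.2))
  (pvGroup pairs).map (fun p => (p.1.1, p.1.2.1, p.1.2.2, p.2))

-- ===== PRECONDITION & SPEC =====
-- Pre_ excludes reduction_factor = 0, on which Python's '//' raises ZeroDivisionError, and association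
-- lists with duplicate color keys, which do not represent a Python dict (dict(...) would collapse them).
def Pre_reduce_colors (colors : List (Int × Int × Int × Int)) (reduction_factor : Int) : Prop :=
  reduction_factor ≠ 0 ∧ (colors.map (fun e => (e.1, e.2.1, e.2.2.1))).Nodup
instance (colors : List (Int × Int × Int × Int)) (reduction_factor : Int) : Decidable (Pre_reduce_colors colors reduction_factor) := by unfold Pre_reduce_colors; infer_instance

def pvWitness_reduce_colors : (List (Int × Int × Int × Int)) × Int :=
  ([(0, 0, 0, 5), (100, 50, 20, 3), (101, 50, 20, 1)], 32)

def Spec_reduce_colors (colors : List (Int × Int × Int × Int)) (reduction_factor : Int) (out : List (Int × Int × Int × Int)) : Prop := out = reduce_colors_alt colors reduction_factor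
instance (colors : List (Int × Int × Int × Int)) (reduction_factor : Int) (out : List (Int × Int × Int × Int)) : Decidable (Spec_reduce_colors colors reduction_factor out) := by unfold Spec_reduce_colors; infer_instance

-- ===== CLAIM (what is proved, stated in full; the proofs are below) =====
def Claim_equal_reduce_colors : Prop := ∀ (colors : List (Int × Int × Int × Int)) (reduction_factor : Int), Dom_reduce_colors colors reduction_factor → Pre_reduce_colors colors reduction_factor → Spec_reduce_colors colors reduction_factor (reduce_colors colors reduction_factor)

-- ===== LEMMAS AND PROOFS =====

-- value of A's Counter at a key: the running getD accumulates the counts of the entries quantizing to it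
theorem pvGetD_foldl (rf : Int) (l : List (Int × Int × Int × Int))
    (d : PySem.Dict (Int × Int × Int) Int) (k : Int × Int × Int) :
    (l.foldl (fun d e => d.modify (pvKey rf e) 0 (· + e.2.2.2)) d).getD k 0
      = d.getD k 0 + ((l.filter (fun e => pvKey rf e == k)).map (·.2.2.2)).sum := by
  induction l generalizing d with
  | nil => simp
  | cons e l ih =>
    simp only [List.foldl_cons, List.filter_cons, ih, PySem.Dict.getD_modify]
    by_cases h : pvKey rf e = k
    · simp [h, add_assoc]
    · simp [h, Ne.symm h]

-- set(…) commutes with filter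
theorem pvOfList_filter {α : Type} [BEq α] [LawfulBEq α] (p : α → Bool) (l : List α) :
    (PySem.Set.ofList l).filter p = PySem.Set.ofList (l.filter p) := by
  induction l with
  | nil => rfl
  | cons x l ih =>
    by_cases h : p x
    · rw [PySem.Set.ofList_cons, List.filter_cons, if_pos h, List.filter_cons, if_pos h,
        PySem.Set.ofList_cons, ← ih]
      simp only [PySem.Set.discard, List.filter_filter]
      congr 1
      apply List.filter_congr
      intro a _
      exact Bool.and_comm _ _
    · rw [PySem.Set.ofList_cons, List.filter_cons, if_neg h, List.filter_cons, if_neg h, ← ih]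
      simp only [PySem.Set.discard, List.filter_filter]
      apply List.filter_congr
      intro a _
      by_cases hp : p a
      · have hax : (a == x) = false := by
          refine beq_eq_false_iff_ne.mpr ?_
          intro e
          subst e
          exact h hp
        simp [hp, hax]
      · simp [hp]

-- B's selection grouping emits each distinct key once, in first-occurrence order, with the summed counts
theorem pvGroup_eq_aux (n : Nat) : ∀ ps : List ((Int × Int × Int) × Int), ps.length ≤ n →
    pvGroup ps = (PySem.Set.ofList (ps.map (·.1))).map
      (fun k => (k, ((ps.filter (fun q => q.1 == k)).map (·.2)).sum)) := by
  induction n with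
  | zero =>
    intro ps h
    have : ps = [] := List.eq_nil_of_length_eq_zero (Nat.le_zero.mp h)
    subst this
    simp [pvGroup]
  | succ n ih =>
    intro ps h
    match ps with
    | [] => simp [pvGroup]
    | p :: rest =>
      have hr : (rest.filter (fun q => q.1 != p.1)).length ≤ n :=
        le_trans (List.length_filter_le _ _) (Nat.le_of_succ_le_succ (by simpa using h))
      rw [pvGroup, ih _ hr, List.map_cons, PySem.Set.ofList_cons, List.map_cons]
      congr 1
      · simp
      · simp only [PySem.Set.discard]
        rw [show (rest.filter (fun q => q.1 != p.1)).map (fun q => q.1)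
              = (rest.map (fun q => q.1)).filter (fun y => !(y == p.1)) by
            rw [List.filter_map]; rfl]
        rw [pvOfList_filter]
        apply List.map_congr_left
        intro k hk
        have hkne : (k == p.1) = false := by
          have hmem : k ∈ (rest.map (fun q => q.1)).filter (fun y => !(y == p.1)) :=
            (PySem.Set.mem_ofList _ _).mp hk
          simpa using (List.mem_filter.mp hmem).2
        have hkp : k ≠ p.1 := by simpa using hkne
        congr 1
        rw [List.filter_cons]
        simp only [show (p.1 == k) = false by simp [Ne.symm hkp], Bool.false_eq_true, if_neg,
          not_false_eq_true, List.filter_filter]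
        apply congrArg
        apply congrArg
        apply List.filter_congr
        intro q _
        by_cases hq : (q.1 == k) = true
        · simp [beq_iff_eq.mp hq, hkp, bne]
        · simp [hq]

theorem pvGroup_eq (ps : List ((Int × Int × Int) × Int)) :
    pvGroup ps = (PySem.Set.ofList (ps.map (·.1))).map
      (fun k => (k, ((ps.filter (fun q => q.1 == k)).map (·.2)).sum)) :=
  pvGroup_eq_aux ps.length ps le_rfl

-- ===== VERDICT (by name: the statement is the Claim_ definition above) =====
theorem reduce_colors_spec : Claim_equal_reduce_colors := by
  intro colors rf _ _
  unfold Spec_reduce_colors reduce_colors reduce_colors_alt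
  dsimp only
  rw [pvGroup_eq]
  have hkeys : (colors.foldl (fun d e => d.modify (pvKey rf e) 0 (· + e.2.2.2))
      PySem.Dict.empty).keys = PySem.Set.ofList (colors.map (pvKey rf)) := by
    rw [PySem.Dict.keys_foldl_modify_key colors (pvKey rf) 0 (fun _ e v => v + e.2.2.2)]
    simp [PySem.Set.update_nil_left]
  have hnodup : (colors.foldl (fun d e => d.modify (pvKey rf e) 0 (· + e.2.2.2))
      PySem.Dict.empty).keys.Nodup := by
    rw [hkeys]; exact PySem.Set.nodup_ofList _
  rw [PySem.Dict.items_eq_map_keys _ hnodup 0, hkeys, List.map_map, List.map_map]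
  rw [show (colors.map (fun e => (pvKey rf e, e.2.2.2))).map (fun q => q.1)
        = colors.map (pvKey rf) by rw [List.map_map]; rfl]
  apply List.map_congr_left
  intro k hk
  simp only [Function.comp_apply]
  rw [pvGetD_foldl]
  simp only [PySem.Dict.getD_empty, zero_add]
  rw [List.filter_map, List.map_map]
  rfl
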